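-- pv_equiv track=rewrite | github.com/Unratedpupet/CISC108 | for_lecture.py | remove_after_high
-- ===== SOURCE A (Python) =====
-- beta = 8
--
-- def remove_after_high(items: list[int]) -> list[int]:
--     """
--     Go through a list and find the first element greater than
--     some threshold `beta`. Then, return a new list without that
--     element or any element that comes after it.
--     """
--     taken = []
--     taking = True
--     for item in items:
--         if item > beta:
--             taking= False
--         elif taking:
--             taken.append(item)
--     return taken
-- ===== SOURCE B (Python) =====
-- beta = 8
--
-- def remove_after_high(items: list[int]) -> list[int]:
--     idx = next((i for i, x in enumerate(items) if x > beta), len(items))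
--     return items[:idx]
-- ===== Notes on version B (the rewrite author's own statement) =====
-- stated objective: simpler
-- what changed: Replaces the flag-and-append loop with finding the cutoff index of the first element > beta and returning a single slice of the input.
import Mathlib
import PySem

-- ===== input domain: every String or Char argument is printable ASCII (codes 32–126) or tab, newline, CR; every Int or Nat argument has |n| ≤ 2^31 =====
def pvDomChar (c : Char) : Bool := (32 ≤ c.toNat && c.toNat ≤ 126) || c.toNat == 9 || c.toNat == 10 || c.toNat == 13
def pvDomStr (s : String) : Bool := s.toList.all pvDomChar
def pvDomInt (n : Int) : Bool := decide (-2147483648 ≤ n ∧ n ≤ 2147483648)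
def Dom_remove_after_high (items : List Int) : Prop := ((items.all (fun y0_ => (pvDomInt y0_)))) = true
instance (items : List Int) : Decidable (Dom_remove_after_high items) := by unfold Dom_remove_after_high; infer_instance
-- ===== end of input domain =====

-- B replaces A's flag-and-append loop with a cutoff-index search followed by a single slice (objective: simpler).
-- ===== PORT A =====
-- A: loop with a 'taking' flag, appending while the flag holds.
def removeAfterHighLoop (items : List Int) (taken : List Int) (taking : Bool) : List Int :=
  match items with
  | [] => taken
  | item :: rest =>
    if item > 8 then removeAfterHighLoop rest taken false
    else if taking then removeAfterHighLoop rest (taken ++ [item]) taking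
    else removeAfterHighLoop rest taken taking

def remove_after_high (items : List Int) : List Int :=
  removeAfterHighLoop items [] true

-- ===== PORT B =====
-- B: find the index of the first element > beta (default length), then slice.
def firstHighIdx (items : List Int) (i : Int) : Int :=
  match items with
  | [] => i
  | x :: rest => if x > 8 then i else firstHighIdx rest (i + 1)

def remove_after_high_alt (items : List Int) : List Int :=
  PySem.List.slice items none (some (firstHighIdx items 0))

-- ===== PRECONDITION & SPEC =====
def Spec_remove_after_high (items : List Int) (out : List Int) : Prop := out = remove_after_high_alt items
instance (items : List Int) (out : List Int) : Decidable (Spec_remove_after_high items out) := by unfold Spec_remove_after_high; infer_instance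

-- ===== CLAIM (what is proved, stated in full; the proofs are below) =====
def Claim_equal_remove_after_high : Prop := ∀ (items : List Int), Dom_remove_after_high items → Spec_remove_after_high items (remove_after_high items)

-- ===== LEMMAS AND PROOFS =====

-- ===== VERDICT (by name: the statement is the Claim_ definition above) =====
theorem loop_false (items taken : List Int) :
    removeAfterHighLoop items taken false = taken := by
  induction items generalizing taken with
  | nil => rfl
  | cons x rest ih => simp [removeAfterHighLoop]; exact ih taken

theorem firstHighIdx_shift (items : List Int) (i : Int) :
    firstHighIdx items i = firstHighIdx items 0 + i := by
  induction items generalizing i with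
  | nil => simp [firstHighIdx]
  | cons x rest ih =>
    simp only [firstHighIdx]
    split_ifs with h
    · simp
    · rw [ih (i+1), ih (0+1)]; ring

theorem slice_to_take (xs : List Int) (n : Nat) :
    PySem.List.slice xs none (some (n : Int)) = xs.take n := by
  simpa using PySem.List.slice_to (xs := xs) (n := n)

theorem key (items : List Int) :
    remove_after_high items = items.take (firstHighIdx items 0).toNat := by
  show removeAfterHighLoop items [] true = _
  suffices h : ∀ acc, removeAfterHighLoop items acc true
      = acc ++ items.take (firstHighIdx items 0).toNat by simp [h []]
  induction items with
  | nil => intro acc; simp [removeAfterHighLoop, firstHighIdx]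
  | cons x rest ih =>
    intro acc
    simp only [removeAfterHighLoop, firstHighIdx]
    split_ifs with h
    · simp [loop_false]
    · rw [ih (acc ++ [x]), firstHighIdx_shift rest (0+1)]
      have h0 : 0 ≤ firstHighIdx rest 0 := by
        clear ih; induction rest generalizing acc with
        | nil => simp [firstHighIdx]
        | cons y r ihr =>
          simp only [firstHighIdx]; split_ifs
          · simp
          · rw [firstHighIdx_shift r (0+1)]; have := ihr acc; omega
      have : (firstHighIdx rest 0 + 1).toNat = (firstHighIdx rest 0).toNat + 1 := by omega
      simp [this, List.take_succ_cons]

theorem firstHighIdx_nonneg (items : List Int) : 0 ≤ firstHighIdx items 0 := by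
  induction items with
  | nil => simp [firstHighIdx]
  | cons y r ihr =>
    simp only [firstHighIdx]; split_ifs
    · simp
    · rw [firstHighIdx_shift r (0+1)]; omega

theorem remove_after_high_spec : Claim_equal_remove_after_high := by
  intro items _
  show remove_after_high items = remove_after_high_alt items
  rw [key]
  show _ = PySem.List.slice items none (some (firstHighIdx items 0))
  have h0 : 0 ≤ firstHighIdx items 0 := firstHighIdx_nonneg items
  have h1 : firstHighIdx items 0 = ((firstHighIdx items 0).toNat : Int) := by omega
  rw [h1, slice_to_take, Int.toNat_natCast]
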